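-- pv_equiv track=rewrite | github.com/azeemarshad97/kos-project | parser/modules/open_and_format.py | concatParagraph
-- ===== SOURCE A (Python) =====
-- def text_format(line):
--     return line.replace(" >", ">").replace("\n","").replace("\xa0"," ").replace("</em >","<em>")
--
-- def isOpenParagraphOnly(line):
--     return (line.count("<p>") > 0 and line.count("</p>") == 0)
--
-- def isCloseParagraphOnly(line):
--     return (line.count("<p>") == 0 and line.count("</p>") > 0)
--
-- def isNoParagraph(line):
--     return (line.count("<p>") == 0 and line.count("</p>") == 0)
--
-- def joinTilNextCloseParagraph(text, linenumber):
--     i = linenumber+1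
--     while(i < len(text)):
--         if isCloseParagraphOnly(text[i]):
--             return text_format(" ".join(text[linenumber:i+1]))
--         i += 1
--
-- def concatParagraph(text):
--     res = []
--     for linenumber, line in enumerate(text):
--         if isOpenParagraphOnly(line):
--             res.append(joinTilNextCloseParagraph(text, linenumber))
--         elif isCloseParagraphOnly(line) or isNoParagraph(line):
--             pass
--         else:
--             res.append(line)
--     return res
-- ===== SOURCE B (Python) =====
-- def text_format(line):
--     return line.replace(" >", ">").replace("\n","").replace("\xa0"," ").replace("</em >","<em>")
--
-- def isOpenParagraphOnly(line):
--     return (line.count("<p>") > 0 and line.count("</p>") == 0)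
--
-- def isCloseParagraphOnly(line):
--     return (line.count("<p>") == 0 and line.count("</p>") > 0)
--
-- def isNoParagraph(line):
--     return (line.count("<p>") == 0 and line.count("</p>") == 0)
--
-- def concatParagraph(text):
--     # Backward pass: nxt[i] = index of nearest close-paragraph-only line after i (None if none).
--     n = len(text)
--     nxt = [None] * n
--     cur = None
--     for i in range(n - 1, -1, -1):
--         nxt[i] = cur
--         if isCloseParagraphOnly(text[i]):
--             cur = i
--     res = []
--     for i, line in enumerate(text):
--         if isOpenParagraphOnly(line):
--             j = nxt[i]
--             res.append(None if j is None else text_format(" ".join(text[i:j+1])))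
--         elif isCloseParagraphOnly(line) or isNoParagraph(line):
--             pass
--         else:
--             res.append(line)
--     return res
-- ===== Notes on version B (the rewrite author's own statement) =====
-- stated objective: alternative
-- what changed: replaces the per-open-line forward rescan (joinTilNextCloseParagraph's while loop) by a single backward pass precomputing the nearest following close-paragraph index for every line, looked up in O(1); avoids A's quadratic rescans but pays a constant-factor extra pass, so it was not measurably faster on the generated inputs
import Mathlib
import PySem

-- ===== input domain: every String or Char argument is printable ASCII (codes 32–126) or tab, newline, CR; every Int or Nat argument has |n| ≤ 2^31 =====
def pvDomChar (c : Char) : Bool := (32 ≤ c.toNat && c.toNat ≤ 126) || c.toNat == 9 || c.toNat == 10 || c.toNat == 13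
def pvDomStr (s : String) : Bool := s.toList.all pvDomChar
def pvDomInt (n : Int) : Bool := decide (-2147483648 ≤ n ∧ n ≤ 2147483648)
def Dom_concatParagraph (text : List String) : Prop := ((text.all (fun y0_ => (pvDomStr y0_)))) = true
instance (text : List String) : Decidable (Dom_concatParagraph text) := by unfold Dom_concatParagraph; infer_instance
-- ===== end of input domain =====

-- B replaces A's per-open-line forward rescan by one backward pass precomputing the nearest
-- following close-paragraph index (objective: alternative algorithm, same measured cost).

-- ===== PORT A =====
def pvFmt (line : String) : String :=
  PySem.Str.replace (PySem.Str.replace (PySem.Str.replace (PySem.Str.replace line " >" ">") "\n" "") "\u00A0" " ") "</em >" "<em>"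

def pvOpenOnly (line : String) : Bool :=
  decide (0 < PySem.Str.count line "<p>") && (PySem.Str.count line "</p>" == 0)

def pvCloseOnly (line : String) : Bool :=
  (PySem.Str.count line "<p>" == 0) && decide (0 < PySem.Str.count line "</p>")

def pvNoPar (line : String) : Bool :=
  (PySem.Str.count line "<p>" == 0) && (PySem.Str.count line "</p>" == 0)

-- the while loop of joinTilNextCloseParagraph, i counting up from linenumber+1
def pvJoinTil (text : List String) (ln : Nat) (i : Nat) : Option String :=
  if h : i < text.length then
    if pvCloseOnly text[i] then
      some (pvFmt (PySem.Str.join " " (PySem.List.slice text (some (ln : Int)) (some ((i : Int) + 1)))))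
    else pvJoinTil text ln (i + 1)
  else none
termination_by text.length - i

def concatParagraph (text : List String) : List (Option String) :=
  (PySem.List.enumerate text).foldl (fun res p =>
    if pvOpenOnly p.2 then res ++ [pvJoinTil text p.1.toNat (p.1.toNat + 1)]
    else if pvCloseOnly p.2 || pvNoPar p.2 then res
    else res ++ [some p.2]) []

-- ===== PORT B =====
-- backward pass: entry for index i is the nearest close-only index > i ('nxt' array of Source B)
def pvGoNxt : List String → Nat → (List (Option Nat) × Option Nat)
  | [], _ => ([], none)
  | s :: rest, i =>
      let r := pvGoNxt rest (i + 1)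
      (r.2 :: r.1, if pvCloseOnly s then some i else r.2)

def concatParagraph_alt (text : List String) : List (Option String) :=
  let nxt := (pvGoNxt text 0).1
  ((PySem.List.enumerate text).zip nxt).foldl (fun res q =>
    if pvOpenOnly q.1.2 then
      res ++ [match q.2 with
              | none => none
              | some j => some (pvFmt (PySem.Str.join " " (PySem.List.slice text (some q.1.1) (some ((j : Int) + 1)))))]
    else if pvCloseOnly q.1.2 || pvNoPar q.1.2 then res
    else res ++ [some q.1.2]) []

-- ===== PRECONDITION & SPEC =====
def Spec_concatParagraph (text : List String) (out : List (Option String)) : Prop := out = concatParagraph_alt text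
instance (text : List String) (out : List (Option String)) : Decidable (Spec_concatParagraph text out) := by unfold Spec_concatParagraph; infer_instance

-- ===== CLAIM (what is proved, stated in full; the proofs are below) =====
def Claim_equal_concatParagraph : Prop := ∀ (text : List String), Dom_concatParagraph text → Spec_concatParagraph text (concatParagraph text)

-- ===== LEMMAS AND PROOFS =====

-- first index ≥ k (within the suffix l) holding a close-only line
def pvFirstClose : Nat → List String → Option Nat
  | _, [] => none
  | k, s :: r => if pvCloseOnly s then some k else pvFirstClose (k + 1) r

theorem pvGoNxt_snd (l : List String) : ∀ i, (pvGoNxt l i).2 = pvFirstClose i l := by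
  induction l with
  | nil => intro i; rfl
  | cons s r ih => intro i; simp [pvGoNxt, pvFirstClose, ih]

theorem pvJoinTil_eq (text : List String) (ln : Nat) : ∀ i,
    pvJoinTil text ln i = (pvFirstClose i (text.drop i)).map
      (fun j => pvFmt (PySem.Str.join " " (PySem.List.slice text (some (ln : Int)) (some ((j : Int) + 1))))) := by
  intro i
  fun_induction pvJoinTil text ln i with
  | case1 i h hc => rw [List.drop_eq_getElem_cons h]; simp [pvFirstClose, hc]
  | case2 i h hc ih => rw [List.drop_eq_getElem_cons h]; simp [pvFirstClose, hc, ih]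
  | case3 i h => rw [List.drop_eq_nil_of_le (by omega)]; simp [pvFirstClose]
theorem pvMain (text : List String) : ∀ (l : List String) (k : Nat), l = text.drop k →
    ∀ acc : List (Option String),
    (PySem.List.enumerate l (k : Int)).foldl (fun res p =>
      if pvOpenOnly p.2 then res ++ [pvJoinTil text p.1.toNat (p.1.toNat + 1)]
      else if pvCloseOnly p.2 || pvNoPar p.2 then res
      else res ++ [some p.2]) acc
    = ((PySem.List.enumerate l (k : Int)).zip (pvGoNxt l k).1).foldl (fun res q =>
      if pvOpenOnly q.1.2 then
        res ++ [match q.2 with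
                | none => none
                | some j => some (pvFmt (PySem.Str.join " " (PySem.List.slice text (some q.1.1) (some ((j : Int) + 1)))))]
      else if pvCloseOnly q.1.2 || pvNoPar q.1.2 then res
      else res ++ [some q.1.2]) acc := by
  intro l
  induction l with
  | nil => intro k _ acc; simp [PySem.List.enumerate_nil, pvGoNxt]
  | cons s r ih =>
    intro k hl acc
    have hk : k < text.length := by
      by_contra h
      rw [List.drop_eq_nil_of_le (by omega)] at hl
      simp at hl
    rw [List.drop_eq_getElem_cons hk] at hl
    obtain ⟨hs, hr⟩ : s = text[k] ∧ r = text.drop (k + 1) := by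
      exact ⟨(List.cons.injEq _ _ _ _ ▸ hl).1, (List.cons.injEq _ _ _ _ ▸ hl).2⟩
    rw [PySem.List.enumerate_cons]
    simp only [pvGoNxt, List.zip_cons_cons, List.foldl_cons]
    have hacc : (if pvOpenOnly s then acc ++ [pvJoinTil text (k : Int).toNat ((k : Int).toNat + 1)]
        else if pvCloseOnly s || pvNoPar s then acc else acc ++ [some s])
      = (if pvOpenOnly s then
          acc ++ [match (pvGoNxt r (k + 1)).2 with
                  | none => none
                  | some j => some (pvFmt (PySem.Str.join " " (PySem.List.slice text (some (k : Int)) (some ((j : Int) + 1)))))]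
        else if pvCloseOnly s || pvNoPar s then acc else acc ++ [some s]) := by
      by_cases ho : pvOpenOnly s
      · simp only [ho, if_pos, Int.toNat_natCast]
        rw [pvJoinTil_eq, ← hr, pvGoNxt_snd]
        cases pvFirstClose (k + 1) r <;> simp
      · simp [ho]
    rw [hacc]
    have h2 := ih (k + 1) hr
    push_cast at h2
    exact h2 _

-- ===== VERDICT (by name: the statement is the Claim_ definition above) =====
theorem concatParagraph_spec : Claim_equal_concatParagraph := by
  intro text _
  unfold Spec_concatParagraph concatParagraph concatParagraph_alt
  have h := pvMain text text 0 (by simp) []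
  simpa using h
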